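-- pv_equiv track=rewrite | github.com/UKPLab/arxiv2025-misviz | src/rule_based_linter/linter.py | is_dual
-- ===== SOURCE A (Python) =====
-- def is_dual(axis_metadata):
--     '''
--     Rule check for dual axis.
--     '''
--     if 'y1' in axis_metadata['axis']:
--         y1_axis = [axis_metadata['label'][d] for  d in range(len(axis_metadata['label'])) if axis_metadata['axis'][d]=='y1']
--     else:
--         return False
--     if 'y2' in axis_metadata['axis']:
--         y2_axis = [axis_metadata['label'][d] for  d in range(len(axis_metadata['label'])) if axis_metadata['axis'][d]=='y2']
--     else:
--         return False
--     if y1_axis != y2_axis: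
--         return True
--     else:
--         return False
-- ===== SOURCE B (Python) =====
-- def is_dual(axis_metadata):
--     '''
--     Rule check for dual axis.
--     '''
--     axis = axis_metadata['axis']
--     if 'y1' not in axis:
--         return False
--     if 'y2' not in axis:
--         return False
--     label = axis_metadata['label']
--     groups = {}
--     for a, l in zip(axis, label):
--         groups[a] = groups.get(a, []) + [l]
--     return groups.get('y1', []) != groups.get('y2', [])
-- ===== Notes on version B (the rewrite author's own statement) =====
-- stated objective: alternative
-- what changed: B replaces A's two filtered index-scans over range(len(label)) with a single grouping pass over zip(axis,label) building a dict of label lists, then compares the 'y1' and 'y2' groups (defaulting to []).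
import Mathlib
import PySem

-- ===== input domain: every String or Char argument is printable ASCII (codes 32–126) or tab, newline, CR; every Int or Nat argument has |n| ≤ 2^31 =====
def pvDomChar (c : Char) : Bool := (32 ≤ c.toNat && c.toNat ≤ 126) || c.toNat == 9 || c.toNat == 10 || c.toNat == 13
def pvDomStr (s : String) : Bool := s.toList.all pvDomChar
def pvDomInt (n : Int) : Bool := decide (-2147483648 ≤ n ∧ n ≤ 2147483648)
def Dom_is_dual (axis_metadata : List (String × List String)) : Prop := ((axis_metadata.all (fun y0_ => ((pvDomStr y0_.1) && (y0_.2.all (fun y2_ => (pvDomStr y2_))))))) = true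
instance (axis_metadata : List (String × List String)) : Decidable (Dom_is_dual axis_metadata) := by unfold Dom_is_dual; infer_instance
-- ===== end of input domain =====

-- B groups labels by axis key in one zip pass instead of A's two filtered index scans (alternative decomposition, same cost).

-- ===== PORT A =====
def is_dual (axis_metadata : List (String × List String)) : Bool :=
  let axis := ((PySem.Dict.mk axis_metadata).get? "axis").getD []
  if axis.contains "y1" then
    let label := ((PySem.Dict.mk axis_metadata).get? "label").getD []
    let y1_axis := ((PySem.List.pyRange 0 label.length 1).filter
        (fun d => PySem.List.pyGetD axis d "" == "y1")).map (fun d => PySem.List.pyGetD label d "")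
    if axis.contains "y2" then
      let y2_axis := ((PySem.List.pyRange 0 label.length 1).filter
          (fun d => PySem.List.pyGetD axis d "" == "y2")).map (fun d => PySem.List.pyGetD label d "")
      if y1_axis ≠ y2_axis then true else false
    else false
  else false

-- ===== PORT B =====
def is_dual_alt (axis_metadata : List (String × List String)) : Bool :=
  let axis := ((PySem.Dict.mk axis_metadata).get? "axis").getD []
  if !axis.contains "y1" then false
  else if !axis.contains "y2" then false
  else
    let label := ((PySem.Dict.mk axis_metadata).get? "label").getD []
    let groups : PySem.Dict String (List String) := (axis.zip label).foldl
      (fun g p => PySem.Dict.modify g p.1 [] (· ++ [p.2])) PySem.Dict.empty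
    decide (PySem.Dict.getD groups "y1" [] ≠ PySem.Dict.getD groups "y2" [])

-- ===== PRECONDITION & SPEC =====
-- Pre_ excludes exactly the inputs on which A raises: no "axis" key (KeyError), or,
-- when 'y1' occurs in axis, a missing "label" key (KeyError) or a label list longer
-- than axis (IndexError in the comprehension).
def Pre_is_dual (axis_metadata : List (String × List String)) : Prop :=
  (((PySem.Dict.mk axis_metadata).get? "axis").isSome = true) ∧
  ("y1" ∈ ((PySem.Dict.mk axis_metadata).get? "axis").getD [] →
    (((PySem.Dict.mk axis_metadata).get? "label").isSome = true) ∧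
    (((PySem.Dict.mk axis_metadata).get? "label").getD []).length ≤
      (((PySem.Dict.mk axis_metadata).get? "axis").getD []).length)
instance (axis_metadata : List (String × List String)) : Decidable (Pre_is_dual axis_metadata) := by unfold Pre_is_dual; infer_instance

def pvWitness_is_dual : (List (String × List String)) :=
  [("axis", ["y1", "y2"]), ("label", ["a", "b"])]

def Spec_is_dual (axis_metadata : List (String × List String)) (out : Bool) : Prop := out = is_dual_alt axis_metadata
instance (axis_metadata : List (String × List String)) (out : Bool) : Decidable (Spec_is_dual axis_metadata out) := by unfold Spec_is_dual; infer_instance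

-- ===== CLAIM (what is proved, stated in full; the proofs are below) =====
def Claim_equal_is_dual : Prop := ∀ (axis_metadata : List (String × List String)), Dom_is_dual axis_metadata → Pre_is_dual axis_metadata → Spec_is_dual axis_metadata (is_dual axis_metadata)

-- ===== LEMMAS AND PROOFS =====

-- A's filtered index scan over range(len label) equals the c-group of the zip pairing.
theorem scan_eq_zip_group_nat (ax lb : List String) (c : String) (h : lb.length ≤ ax.length) :
    ((List.range lb.length).filter
        (fun d => ax.getD d "" == c)).map (fun d => lb.getD d "") =
    ((ax.zip lb).filter (fun p => p.1 == c)).map (·.2) := by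
  induction lb generalizing ax with
  | nil => simp
  | cons x lb ih =>
    cases ax with
    | nil => simp at h
    | cons a ax =>
      simp only [List.length_cons, List.range_succ_eq_map, List.filter_cons, List.filter_map,
        List.zip_cons_cons]
      by_cases hc : (a == c) = true
      · simp only [List.getD_cons_zero, hc, if_pos]
        simp only [Function.comp_def, List.getD_cons_succ]
        simpa using ih ax (by simpa using h)
      · simp only [List.getD_cons_zero, hc]
        simp only [Bool.false_eq_true, if_false, Function.comp_def, List.getD_cons_succ]
        simpa [hc] using ih ax (by simpa using h)

theorem scan_eq_zip_group (ax lb : List String) (c : String) (h : lb.length ≤ ax.length) :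
    ((PySem.List.pyRange 0 lb.length 1).filter
        (fun d => PySem.List.pyGetD ax d "" == c)).map (fun d => PySem.List.pyGetD lb d "") =
    ((ax.zip lb).filter (fun p => p.1 == c)).map (·.2) := by
  rw [PySem.List.pyRange_zero_natCast]
  simp only [List.filter_map, List.map_map, Function.comp_def, PySem.List.pyGetD_natCast]
  exact scan_eq_zip_group_nat ax lb c h

-- ===== VERDICT (by name: the statement is the Claim_ definition above) =====
theorem is_dual_spec : Claim_equal_is_dual := by
  intro m _ hpre
  obtain ⟨_, h2⟩ := hpre
  unfold Spec_is_dual is_dual is_dual_alt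
  set axis := ((PySem.Dict.mk m).get? "axis").getD [] with hax
  set label := ((PySem.Dict.mk m).get? "label").getD [] with hlb
  by_cases hy1 : axis.contains "y1"
  · have hlen : label.length ≤ axis.length := (h2 (by simpa using hy1)).2
    by_cases hy2 : axis.contains "y2"
    · simp only [hy1, hy2, if_pos, Bool.not_true, Bool.false_eq_true, if_false]
      rw [PySem.Dict.getD_foldl_modify_append, PySem.Dict.getD_foldl_modify_append,
        PySem.Dict.getD_empty, scan_eq_zip_group axis label "y1" hlen,
        scan_eq_zip_group axis label "y2" hlen]
      split_ifs with h <;> simp [h]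
    · have hy2' : ¬ ("y2" ∈ axis) := by simpa using hy2
      simp [hy2']
  · have hy1' : ¬ ("y1" ∈ axis) := by simpa using hy1
    simp [hy1']
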